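-- pv_equiv track=rewrite | github.com/bracerino/uMLIP-Interactive | helpers/phase_diagram.py | get_common_elements
-- ===== SOURCE A (Python) =====
-- def get_common_elements(compositions_dict):
--     all_elements = set()
--     for comp in compositions_dict.values():
--         all_elements.update(comp.keys())
--
--     common_elements = []
--     for element in all_elements:
--         if all(element in comp for comp in compositions_dict.values()):
--             concentrations = [comp[element] for comp in compositions_dict.values()]
--             if len(set(concentrations)) > 1:
--                 common_elements.append(element)
--     return sorted(common_elements)
-- ===== SOURCE B (Python) =====
-- def get_common_elements(compositions_dict):
--     total = len(compositions_dict)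
--     counts = {}
--     values = {}
--     for comp in compositions_dict.values():
--         for element, conc in comp.items():
--             counts[element] = counts.get(element, 0) + 1
--             values.setdefault(element, []).append(conc)
--     return sorted(e for e, c in counts.items()
--                   if c == total and len(set(values[e])) > 1)
-- ===== Notes on version B (the rewrite author's own statement) =====
-- stated objective: alternative
-- what changed: Instead of collecting all elements and then rescanning every composition per element (membership test plus concentration gather), B makes one pass over the compositions building an element->count dict and an element->concentration-list dict, then filters the count dict's keys by count == total and more than one distinct concentration.
import Mathlib
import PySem

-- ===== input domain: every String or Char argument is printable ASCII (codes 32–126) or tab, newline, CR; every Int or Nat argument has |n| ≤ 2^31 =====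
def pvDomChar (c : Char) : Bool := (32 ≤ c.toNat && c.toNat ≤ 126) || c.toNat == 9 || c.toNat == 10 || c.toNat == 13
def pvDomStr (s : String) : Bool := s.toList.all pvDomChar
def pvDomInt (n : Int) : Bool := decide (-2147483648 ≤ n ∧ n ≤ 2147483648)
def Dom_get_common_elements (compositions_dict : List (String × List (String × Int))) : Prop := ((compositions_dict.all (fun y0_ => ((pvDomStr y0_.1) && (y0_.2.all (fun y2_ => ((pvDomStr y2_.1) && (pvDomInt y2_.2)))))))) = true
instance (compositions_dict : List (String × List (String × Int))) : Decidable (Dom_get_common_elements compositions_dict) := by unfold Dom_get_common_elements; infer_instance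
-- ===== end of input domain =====

-- B builds, in one pass over the compositions, an element→count dict and an element→concentration-list
-- dict, then filters the elements seen in every composition with more than one distinct concentration;
-- this replaces A's per-element rescans of all compositions (objective: alternative).

-- ===== PORT A =====
def get_common_elements (compositions_dict : List (String × List (String × Int))) : List String :=
  let vs := (PySem.Dict.ofList compositions_dict).values
  let allElements : PySem.Set String :=
    vs.foldl (fun s comp => PySem.Set.update s (PySem.Dict.ofList comp).keys) PySem.Set.empty
  let common : List String :=
    allElements.foldl (fun acc element =>
      if vs.all (fun comp => (PySem.Dict.ofList comp).contains element) then
        let concentrations := vs.map (fun comp => (PySem.Dict.ofList comp).get? element)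
        if (PySem.Set.ofList concentrations).length > 1 then acc ++ [element] else acc
      else acc) []
  PySem.List.sorted common (fun x => x) false

-- ===== PORT B =====
def get_common_elements_alt (compositions_dict : List (String × List (String × Int))) : List String :=
  let vs := (PySem.Dict.ofList compositions_dict).values
  let total : Int := vs.length
  let cv :=
    vs.foldl (fun cv comp =>
        (PySem.Dict.ofList comp).items.foldl
          (fun cv p => (cv.1.modify p.1 0 (· + 1), cv.2.modify p.1 [] (· ++ [p.2]))) cv)
      ((PySem.Dict.empty : PySem.Dict String Int), (PySem.Dict.empty : PySem.Dict String (List Int)))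
  PySem.List.sorted
    (cv.1.items.filterMap (fun p =>
      if p.2 == total ∧ (PySem.Set.ofList (cv.2.getD p.1 [])).length > 1 then some p.1 else none))
    (fun x => x) false

-- ===== PRECONDITION & SPEC =====
def Spec_get_common_elements (compositions_dict : List (String × List (String × Int))) (out : List String) : Prop := out = get_common_elements_alt compositions_dict
instance (compositions_dict : List (String × List (String × Int))) (out : List String) : Decidable (Spec_get_common_elements compositions_dict out) := by unfold Spec_get_common_elements; infer_instance

-- ===== CLAIM (what is proved, stated in full; the proofs are below) =====
def Claim_equal_get_common_elements : Prop := ∀ (compositions_dict : List (String × List (String × Int))), Dom_get_common_elements compositions_dict → Spec_get_common_elements compositions_dict (get_common_elements compositions_dict)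

-- ===== LEMMAS AND PROOFS =====


-- general: count of an element in a Nodup list
theorem pv_count_nodup {α : Type} [DecidableEq α] (L : List α) (h : L.Nodup) (e : α) :
    List.count e L = if e ∈ L then 1 else 0 := by
  split_ifs with hm
  · have h1 := List.nodup_iff_count_le_one.mp h e
    have h2 := List.count_pos_iff.mpr hm
    omega
  · exact List.count_eq_zero.mpr hm

-- the all-elements accumulation loop is one big Set.update
theorem pv_fold_update (vs : List (List (String × Int))) (s : PySem.Set String) :
    vs.foldl (fun s comp => PySem.Set.update s (PySem.Dict.ofList comp).keys) s
      = PySem.Set.update s (vs.flatMap (fun c => (PySem.Dict.ofList c).keys)) := by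
  induction vs generalizing s with
  | nil => simp [PySem.Set.update_nil]
  | cons c cs ih => simp only [List.foldl_cons, List.flatMap_cons, PySem.Set.update_append, ih]

-- a nested fold over per-composition items is a fold over the flattened items
theorem pv_fold_flat {σ : Type} (f : σ → (String × Int) → σ) (vs : List (List (String × Int))) (init : σ) :
    vs.foldl (fun acc comp => (PySem.Dict.ofList comp).items.foldl f acc) init
      = (vs.flatMap (fun c => (PySem.Dict.ofList c).items)).foldl f init := by
  induction vs generalizing init with
  | nil => rfl
  | cons c cs ih => simp only [List.foldl_cons, List.flatMap_cons, List.foldl_append, ih]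

-- filtering a dict's items by key yields its unique entry (or nothing)
theorem pv_filter_items (dd : PySem.Dict String Int) (h : dd.keys.Nodup) (e : String) :
    dd.items.filter (fun p => p.1 == e)
      = if dd.contains e then [(e, dd.getD e 0)] else [] := by
  obtain ⟨l⟩ := dd
  rw [PySem.Dict.keys_mk] at h
  induction l with
  | nil => simp [PySem.Dict.contains_mk]
  | cons q t ih =>
    obtain ⟨k, v⟩ := q
    simp only [List.map_cons, List.nodup_cons] at h
    by_cases hk : k = e
    · subst hk
      have ht : t.filter (fun p => p.1 == k) = [] := by
        rw [List.filter_eq_nil_iff]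
        intro a ha hba
        rw [beq_iff_eq] at hba
        exact h.1 (hba ▸ List.mem_map_of_mem ha)
      simp [ht, PySem.Dict.contains_mk, PySem.Dict.getD_eq_get?_getD,
            PySem.Dict.get?_mk_cons]
    · have hkb : ((k : String) == e) = false := by simpa using hk
      simp only [List.filter_cons, Bool.false_eq_true, if_false, ih h.2,
                 PySem.Dict.contains_mk, List.any_cons, hkb, Bool.false_or,
                 PySem.Dict.getD_eq_get?_getD, PySem.Dict.get?_mk_cons]

-- count of e in the flattened keys = number of compositions containing e
theorem pv_count_flatK (vs : List (List (String × Int))) (e : String) :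
    List.count e (vs.flatMap (fun c => (PySem.Dict.ofList c).keys))
      = vs.countP (fun c => (PySem.Dict.ofList c).contains e) := by
  induction vs with
  | nil => rfl
  | cons c cs ih =>
    rw [List.flatMap_cons, List.count_append, ih, List.countP_cons,
        pv_count_nodup _ (PySem.Dict.nodup_keys_ofList c) e]
    by_cases hc : (PySem.Dict.ofList c).contains e = true
    · simp [hc, (PySem.Dict.contains_iff_mem_keys _ _).mp hc, Nat.add_comm]
    · have : e ∉ (PySem.Dict.ofList c).keys := fun hm =>
        hc ((PySem.Dict.contains_iff_mem_keys _ _).mpr hm)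
      simp [hc, this]

-- under "every composition contains e", the flattened items filtered by key e
-- list one pair per composition, in order
theorem pv_filter_flat (vs : List (List (String × Int))) (e : String)
    (h : ∀ c ∈ vs, (PySem.Dict.ofList c).contains e = true) :
    (vs.flatMap (fun c => (PySem.Dict.ofList c).items)).filter (fun p => p.1 == e)
      = vs.map (fun c => (e, (PySem.Dict.ofList c).getD e 0)) := by
  induction vs with
  | nil => rfl
  | cons c cs ih =>
    rw [List.flatMap_cons, List.filter_append, ih (fun c hc => h c (List.mem_cons_of_mem _ hc)),
        List.map_cons, pv_filter_items _ (PySem.Dict.nodup_keys_ofList c) e,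
        if_pos (h c (List.mem_cons_self))]
    rfl

theorem pv_get?_of_contains {κ ν : Type} [BEq κ] [LawfulBEq κ] (d : PySem.Dict κ ν) (k : κ) (d0 : ν)
    (h : d.contains k = true) : d.get? k = some (d.getD k d0) := by
  cases hv : d.get? k with
  | none =>
    rw [PySem.Dict.get?_eq_none_iff_contains] at hv
    rw [hv] at h; cases h
  | some v => rw [PySem.Dict.getD_eq_get?_getD, hv]; rfl

-- set(map f xs) = map f (set(xs)) for injective f
theorem pv_ofList_map {α β : Type} [BEq α] [LawfulBEq α] [BEq β] [LawfulBEq β] (f : α → β)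
    (hf : Function.Injective f) (l : List α) :
    PySem.Set.ofList (l.map f) = (PySem.Set.ofList l).map f := by
  induction l using List.reverseRecOn with
  | nil => rfl
  | append_singleton xs x ih =>
    rw [List.map_append, List.map_cons, List.map_nil, PySem.Set.ofList_append_singleton,
        PySem.Set.ofList_append_singleton, ih, PySem.Set.add_eq_ite, PySem.Set.add_eq_ite]
    by_cases hm : x ∈ PySem.Set.ofList xs
    · rw [if_pos ((List.mem_map_of_injective hf).mpr hm), if_pos hm]
    · rw [if_neg (fun h => hm ((List.mem_map_of_injective hf).mp h)), if_neg hm, List.map_append,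
          List.map_cons, List.map_nil]

theorem pv_filterMap_guard {α : Type} (p : α → Prop) [DecidablePred p] (l : List α) :
    l.filterMap (fun k => if p k then some k else none) = l.filter (fun k => decide (p k)) := by
  induction l with
  | nil => rfl
  | cons x t ih => by_cases h : p x <;> simp [h, ih]

-- a fold with two independent dict accumulators is two folds
theorem pv_pair_split (l : List (String × Int)) (a : PySem.Dict String Int)
    (b : PySem.Dict String (List Int)) :
    l.foldl (fun cv p => (cv.1.modify p.1 0 (· + 1), cv.2.modify p.1 [] (· ++ [p.2]))) (a, b)
      = (l.foldl (fun d p => d.modify p.1 0 (· + 1)) a,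
         l.foldl (fun d p => d.modify p.1 [] (· ++ [p.2])) b) := by
  induction l generalizing a b with
  | nil => rfl
  | cons x t ih => simp only [List.foldl_cons, ih]

-- proof-only abbreviation for B's one-pass pair of dicts
def pvPairFold (vs : List (List (String × Int))) :
    PySem.Dict String Int × PySem.Dict String (List Int) :=
  vs.foldl (fun cv comp =>
      (PySem.Dict.ofList comp).items.foldl
        (fun cv p => (cv.1.modify p.1 0 (· + 1), cv.2.modify p.1 [] (· ++ [p.2]))) cv)
    (PySem.Dict.empty, PySem.Dict.empty)

-- the core equivalence, over the shared list of composition dicts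
theorem pv_core (vs : List (List (String × Int))) :
    PySem.List.sorted
      ((vs.foldl (fun s comp => PySem.Set.update s (PySem.Dict.ofList comp).keys)
          PySem.Set.empty).foldl
        (fun acc element =>
          if vs.all (fun comp => (PySem.Dict.ofList comp).contains element) then
            if (PySem.Set.ofList (vs.map (fun comp => (PySem.Dict.ofList comp).get? element))).length > 1
            then acc ++ [element] else acc
          else acc) [])
      (fun x => x) false
    = PySem.List.sorted
        ((pvPairFold vs).1.items.filterMap
          (fun p =>
            if p.2 == (vs.length : Int) ∧
               (PySem.Set.ofList ((pvPairFold vs).2.getD p.1 [])).length > 1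
            then some p.1 else none))
        (fun x => x) false := by
  congr 1
  -- name the flattened items and keys
  set flat := vs.flatMap (fun c => (PySem.Dict.ofList c).items) with hflat
  set K := vs.flatMap (fun c => (PySem.Dict.ofList c).keys) with hK
  -- LHS: the accumulation loop is a filter of the deduplicated key list
  rw [pv_fold_update, PySem.Set.update_empty]
  have hstep : ∀ element ∈ (PySem.Set.ofList K : List String), ∀ (acc : List String),
      (if vs.all (fun comp => (PySem.Dict.ofList comp).contains element) then
        if (PySem.Set.ofList (vs.map fun comp => (PySem.Dict.ofList comp).get? element)).length > 1
        then acc ++ [element] else acc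
       else acc)
      = if (vs.all (fun comp => (PySem.Dict.ofList comp).contains element)) = true ∧
           (PySem.Set.ofList (vs.map fun comp => (PySem.Dict.ofList comp).get? element)).length > 1
        then acc ++ [element] else acc := by
    intro e _ acc
    by_cases h1 : vs.all (fun comp => (PySem.Dict.ofList comp).contains e) = true
    · by_cases h2 : (PySem.Set.ofList (vs.map fun comp => (PySem.Dict.ofList comp).get? e)).length > 1
      · simp [h1, h2]
      · simp [h1, h2]
    · simp [h1]
  rw [PySem.List.foldl_congr_mem' _ _ _ _ hstep, PySem.List.foldl_append_ite_eq_filter,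
      List.nil_append]
  -- RHS: split the pair fold into the two dict folds over the flattened items
  have hsplit : pvPairFold vs
      = (flat.foldl (fun d p => d.modify p.1 0 (· + 1)) PySem.Dict.empty,
         flat.foldl (fun d p => d.modify p.1 [] (· ++ [p.2])) PySem.Dict.empty) := by
    unfold pvPairFold
    rw [pv_fold_flat, pv_pair_split, ← hflat]
  have hcounts : flat.foldl (fun d p => d.modify p.1 0 (· + 1))
        (PySem.Dict.empty : PySem.Dict String Int)
      = PySem.Dict.counter (flat.map (fun p => p.1)) := by
    rw [PySem.Dict.counter_eq_foldl, List.foldl_map]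
  have hKm : flat.map (fun p => p.1) = K := by
    rw [hflat, List.map_flatMap]; rfl
  simp only [hsplit, hcounts, hKm, PySem.Dict.items_counter, List.filterMap_map,
             Function.comp, PySem.Dict.getD_foldl_modify_append, PySem.Dict.getD_empty,
             List.nil_append, pv_filterMap_guard]
  -- both sides are filters of the same list: compare the predicates pointwise
  refine List.filter_congr ?_
  intro e he
  rw [decide_eq_decide]
  have hcnt : (((List.count e K : Int) == (vs.length : Int)) = true)
      ↔ (vs.all (fun c => (PySem.Dict.ofList c).contains e) = true) := by
    rw [beq_iff_eq, Nat.cast_inj, hK, pv_count_flatK, List.all_eq_true]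
    exact List.countP_eq_length
  have hlen : (∀ c ∈ vs, (PySem.Dict.ofList c).contains e = true) →
      (PySem.Set.ofList (vs.map (fun comp => (PySem.Dict.ofList comp).get? e))).length
      = (PySem.Set.ofList ((flat.filter (fun p => p.1 == e)).map (fun p => p.2))).length := by
    intro hall
    rw [hflat, pv_filter_flat vs e hall, List.map_map]
    have hmapA : vs.map (fun comp => (PySem.Dict.ofList comp).get? e)
        = (vs.map (fun comp => (PySem.Dict.ofList comp).getD e 0)).map some := by
      rw [List.map_map]
      exact List.map_congr_left (fun c hc => pv_get?_of_contains _ _ _ (hall c hc))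
    rw [hmapA, pv_ofList_map _ (Option.some_injective _), List.length_map]
    rfl
  constructor
  · rintro ⟨h1, h2⟩
    exact ⟨hcnt.mpr h1, by rw [← hlen (List.all_eq_true.mp h1)]; exact h2⟩
  · rintro ⟨h1, h2⟩
    have h1' := hcnt.mp h1
    exact ⟨h1', by rw [hlen (List.all_eq_true.mp h1')]; exact h2⟩

theorem get_common_elements_spec : Claim_equal_get_common_elements := by
  unfold Claim_equal_get_common_elements
  intro d _
  unfold Spec_get_common_elements
  simp only [get_common_elements, get_common_elements_alt]
  exact pv_core _
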